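-- pv_equiv track=rewrite | github.com/google/starthinker | starthinker/util/csv.py | rows_date_sanitize
-- ===== SOURCE A (Python) =====
-- def rows_date_sanitize(rows):
--   first = True
--   date = None
--   for row in rows:
--     if first:
--       # find 'Date' column if it exists
--       try:
--         date = row.index('Date')
--       except ValueError:
--         pass
--
--     # check if data studio formatting is applied
--     if date is not None:
--       row[date] = 'Report_Day' if first else row[date].replace('/', '').replace(
--           '-', '')
--
--     # return the row
--     yield row
--
--     # not first row anymore
--     first = False
-- ===== SOURCE B (Python) =====
-- _DEL = {47: None, 45: None}  # deletion table: ord('/'), ord('-')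
--
-- def rows_date_sanitize(rows):
--   rows = list(rows)
--   if rows and 'Date' in rows[0]:
--     i = rows[0].index('Date')
--     column = ['Report_Day'] + [r[i].translate(_DEL) for r in rows[1:]]
--     for r, v in zip(rows, column):
--       r[i] = v
--   yield from rows
-- ===== Notes on version B (the rewrite author's own statement) =====
-- stated objective: alternative
-- what changed: B is column-oriented and staged: it materializes the rows, tests 'Date' membership in the first row, builds the whole replacement column in one comprehension using a str.translate deletion table (instead of chained replace), writes it back with a zip pass, and yields the rows; A is a row-by-row state machine with a 'first' flag and per-row conditional string replaces.
import Mathlib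
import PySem

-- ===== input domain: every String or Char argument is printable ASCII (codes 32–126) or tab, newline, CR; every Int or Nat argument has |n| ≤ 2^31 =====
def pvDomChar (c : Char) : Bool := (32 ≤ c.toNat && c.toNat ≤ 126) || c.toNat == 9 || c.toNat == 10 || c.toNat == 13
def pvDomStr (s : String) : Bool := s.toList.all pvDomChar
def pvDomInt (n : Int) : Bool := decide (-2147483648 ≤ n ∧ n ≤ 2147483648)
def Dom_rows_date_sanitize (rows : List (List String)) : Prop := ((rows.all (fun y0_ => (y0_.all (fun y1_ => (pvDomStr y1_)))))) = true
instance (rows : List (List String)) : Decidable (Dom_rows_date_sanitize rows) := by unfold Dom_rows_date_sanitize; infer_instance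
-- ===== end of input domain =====

-- B is column-oriented and staged (membership test, one translate-based column pass, zip
-- write-back) instead of A's row-by-row state machine with a 'first' flag; equivalence is
-- about the returned rows (both Pythons also mutate the row lists in place, identically).

-- ===== PORT A =====
-- A's loop, carried state (date, first); row[date] = … is exact where Pre_ holds
-- (on an out-of-range index Python raises IndexError; those inputs are outside Pre_).
def pyA_cell (first : Bool) (s : String) : String :=
  if first then "Report_Day" else PySem.Str.replace (PySem.Str.replace s "/" "") "-" ""

def pyA_loop (date : Option Nat) (first : Bool) (rows : List (List String)) :
    List (List String) :=
  match rows with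
  | [] => []
  | row :: rest =>
    let date := if first then
        (match PySem.List.index? row "Date" with
         | some i => some i
         | none => date)
      else date
    let row' := match date with
      | none => row
      | some i =>
        match PySem.List.pyGet? row (i : Int) with
        | some s => row.set i (pyA_cell first s)
        | none => row   -- IndexError in Python; outside Pre_
    row' :: pyA_loop date false rest

def rows_date_sanitize (rows : List (List String)) : List (List String) :=
  pyA_loop none true rows

-- ===== PORT B =====
-- str.translate({47: None, 45: None}) deletes the chars '/' and '-': a single filter pass (exact)
def pyB_translate (s : String) : String :=
  String.ofList (s.toList.filter (fun c => !(c == '/' || c == '-')))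

def rows_date_sanitize_alt (rows : List (List String)) : List (List String) :=
  match rows with
  | [] => []
  | head :: rest =>
    if head.contains "Date" then
      let i := (PySem.List.index? head "Date").getD 0   -- membership guarantees some
      -- the whole replacement column, built in one pass; r[i] out of range = IndexError, outside Pre_
      let column := "Report_Day" ::
        rest.map (fun r => pyB_translate ((PySem.List.pyGet? r (i : Int)).getD ""))
      (List.zip (head :: rest) column).map (fun p => p.1.set i p.2)
    else head :: rest

-- ===== PRECONDITION & SPEC =====
-- Pre_ excludes exactly the inputs where both Pythons raise IndexError: a first row
-- containing 'Date' at index i while some later row has length ≤ i.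
def Pre_rows_date_sanitize (rows : List (List String)) : Prop :=
  (match rows with
   | [] => true
   | head :: rest =>
     match PySem.List.index? head "Date" with
     | none => true
     | some i => rest.all (fun row => decide (i < row.length))) = true

instance (rows : List (List String)) : Decidable (Pre_rows_date_sanitize rows) := by
  unfold Pre_rows_date_sanitize; infer_instance

def pvWitness_rows_date_sanitize : List (List String) :=
  [["Date", "x"], ["1/2-3", "y"]]

def Spec_rows_date_sanitize (rows : List (List String)) (out : List (List String)) : Prop :=
  out = rows_date_sanitize_alt rows
instance (rows : List (List String)) (out : List (List String)) :
    Decidable (Spec_rows_date_sanitize rows out) := by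
  unfold Spec_rows_date_sanitize; infer_instance

-- ===== CLAIM (what is proved, stated in full; the proofs are below) =====
def Claim_equal_rows_date_sanitize : Prop :=
  ∀ (rows : List (List String)), Dom_rows_date_sanitize rows →
    Pre_rows_date_sanitize rows →
    Spec_rows_date_sanitize rows (rows_date_sanitize rows)

-- ===== LEMMAS AND PROOFS =====

-- after the first row, date = none stays none and rows pass through unchanged
theorem pyA_loop_none_false (rows : List (List String)) :
    pyA_loop none false rows = rows := by
  induction rows with
  | nil => rfl
  | cons row rest ih => simp [pyA_loop, ih]

-- deleting one char d by replace(s, d, '') is a filter (worker of Chars.replace)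
theorem replace_go_del (d : Char) (l acc : List Char) (fuel : Nat)
    (h : l.length ≤ fuel) :
    PySem.Chars.replace.go [d] [] fuel l acc
      = acc.reverse ++ l.filter (fun c => !(c == d)) := by
  induction l generalizing acc fuel with
  | nil => cases fuel <;> simp [PySem.Chars.replace.go]
  | cons c t ih =>
    cases fuel with
    | zero => simp at h
    | succ n =>
      by_cases hc : c = d
      · subst hc
        simp only [PySem.Chars.replace.go, List.isPrefixOf, beq_self_eq_true,
          Bool.true_and, if_true, List.length_cons, List.length_nil,
          List.drop_succ_cons, List.drop_zero, List.reverse_nil, List.nil_append]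
        rw [ih _ _ (by simpa using h)]
        simp
      · simp only [PySem.Chars.replace.go, List.isPrefixOf]
        have hd : (d == c) = false := beq_eq_false_iff_ne.mpr (Ne.symm hc)
        simp only [hd, Bool.false_and]
        rw [ih _ _ (by simpa using h)]
        simp [hc]

theorem replace_del (d : Char) (cs : List Char) :
    PySem.Chars.replace cs [d] [] = cs.filter (fun c => !(c == d)) := by
  have := replace_go_del d cs [] cs.length le_rfl
  simpa [PySem.Chars.replace] using this

-- A's chained replaces equal B's translate filter
theorem cell_eq (s : String) :
    PySem.Str.replace (PySem.Str.replace s "/" "") "-" "" = pyB_translate s := by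
  apply String.ext
  show (PySem.Str.replace (PySem.Str.replace s "/" "") "-" "").toList
      = (pyB_translate s).toList
  rw [PySem.Str.toList_replace, PySem.Str.toList_replace]
  show PySem.Chars.replace (PySem.Chars.replace s.toList ['/'] []) ['-'] []
      = (pyB_translate s).toList
  rw [replace_del, replace_del]
  simp only [pyB_translate, String.toList_ofList, List.filter_filter]
  congr 1
  funext a
  by_cases h1 : a = '/' <;> by_cases h2 : a = '-' <;> simp [h1, h2, Bool.and_comm]

-- A's tail loop with a fixed found index equals B's write-back of the translated column
theorem pyA_loop_some (i : Nat) (rows : List (List String))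
    (h : ∀ row ∈ rows, i < row.length) :
    pyA_loop (some i) false rows
      = rows.map (fun r =>
          r.set i (pyB_translate ((PySem.List.pyGet? r (i : Int)).getD ""))) := by
  induction rows with
  | nil => rfl
  | cons row rest ih =>
    have hi : i < row.length := h row (by simp)
    simp only [pyA_loop, Bool.false_eq_true, if_false, List.map_cons]
    congr 1
    · rw [PySem.List.pyGet?_natCast, List.getElem?_eq_getElem hi]
      simp [pyA_cell, cell_eq]
    · exact ih (fun r hr => h r (by simp [hr]))

-- B's zip write-back over (rows, rows.map f) is a pointwise map
theorem zip_map_set (i : Nat) (f : List String → String) (rows : List (List String)) :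
    (List.zip rows (rows.map f)).map (fun p => p.1.set i p.2)
      = rows.map (fun r => r.set i (f r)) := by
  induction rows with
  | nil => rfl
  | cons r rest ih => rw [List.map_cons, List.zip_cons_cons, List.map_cons, ih]; rfl

-- ===== VERDICT (by name: the statement is the Claim_ definition above) =====
theorem rows_date_sanitize_spec : Claim_equal_rows_date_sanitize := by
  intro rows _ hpre
  unfold Spec_rows_date_sanitize
  cases rows with
  | nil => rfl
  | cons head rest =>
    cases h : PySem.List.index? head "Date" with
    | none =>
      have hmem : head.contains "Date" = false := by
        rw [PySem.List.index?_eq_idxOf?] at h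
        simp only [List.contains_eq_mem, decide_eq_false_iff_not]
        intro hm
        exact absurd h (by simp [List.idxOf?_eq_none_iff, hm])
      simp only [rows_date_sanitize, rows_date_sanitize_alt, pyA_loop, h, hmem,
        Bool.false_eq_true, if_false]
      simp [pyA_loop_none_false]
    | some i =>
      have hi : i < head.length := by
        obtain ⟨hk, _⟩ := PySem.List.getElem_of_index?_eq_some h
        exact hk
      have hmem : head.contains "Date" = true := by
        rw [PySem.List.index?_eq_idxOf?] at h
        simp only [List.contains_eq_mem, decide_eq_true_eq]
        by_contra hm
        rw [List.idxOf?_eq_none_iff.mpr hm] at h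
        simp at h
      have hrange : ∀ row ∈ rest, i < row.length := by
        have h' := h
        rw [PySem.List.index?_eq_idxOf?] at h'
        unfold Pre_rows_date_sanitize at hpre
        simpa [h', PySem.List.index?_eq_idxOf?, List.all_eq_true] using hpre
      simp only [rows_date_sanitize, rows_date_sanitize_alt, pyA_loop, h, hmem, if_true,
        Option.getD_some, List.zip_cons_cons, List.map_cons]
      congr 1
      · rw [PySem.List.pyGet?_natCast, List.getElem?_eq_getElem hi]
        simp [pyA_cell]
      · rw [zip_map_set, pyA_loop_some i rest hrange]
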